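-- pv_equiv track=rewrite | github.com/youweima96-ctrl/AgentSecurity | src/sc1/entropy_calculator.py | _cluster_ids_from_roots
-- ===== SOURCE A (Python) =====
-- from typing import Any, Dict, List
--
-- def _cluster_ids_from_roots(roots: List[int]) -> List[int]:
--     unique: Dict[int, int] = {}
--     out: List[int] = []
--     nxt = 0
--     for r in roots:
--         if r not in unique:
--             unique[r] = nxt
--             nxt += 1
--         out.append(unique[r])
--     return out
-- ===== SOURCE B (Python) =====
-- from typing import List
--
-- def _cluster_ids_from_roots(roots: List[int]) -> List[int]:
--     # Table-free: the cluster id of a root r is the number of distinct values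
--     # appearing strictly before r's first occurrence.  Phase 1 records, at each
--     # position, how many distinct values precede it; phase 2 reads that count
--     # off at each root's first occurrence (list.index).
--     seen = set()
--     counts: List[int] = []          # counts[i] = number of distinct values in roots[:i]
--     for r in roots:
--         counts.append(len(seen))
--         seen.add(r)
--     return [counts[roots.index(r)] for r in roots]
-- ===== Notes on version B (the rewrite author's own statement) =====
-- stated objective: alternative
-- what changed: B builds no value-to-id table and no next-id counter: it first records, in one pass with a set, how many distinct values precede each position (a prefix distinct-count array), then reads each root's id off that array at the root's first occurrence found by list.index — the id is characterized as the count of distinct values before the first occurrence, instead of A's incrementally assigned dict labels.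
import Mathlib
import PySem

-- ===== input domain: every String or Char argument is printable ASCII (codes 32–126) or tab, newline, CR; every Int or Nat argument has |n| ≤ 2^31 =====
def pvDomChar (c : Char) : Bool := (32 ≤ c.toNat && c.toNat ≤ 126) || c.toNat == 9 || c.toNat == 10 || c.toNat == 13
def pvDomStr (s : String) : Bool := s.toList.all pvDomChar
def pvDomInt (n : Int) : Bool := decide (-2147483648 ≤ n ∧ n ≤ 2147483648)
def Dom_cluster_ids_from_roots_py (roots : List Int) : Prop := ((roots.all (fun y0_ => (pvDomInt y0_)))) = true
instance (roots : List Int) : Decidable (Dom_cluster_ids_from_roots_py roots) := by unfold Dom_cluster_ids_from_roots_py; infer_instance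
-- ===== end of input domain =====

-- B replaces A's incremental id-table labeling by a table-free computation: a prefix
-- distinct-count pass, then each id read off at its root's first occurrence (objective: alternative).

-- ===== PORT A =====
-- One pass: grow the dict and append in the same loop, state (unique, out, nxt).
def cluster_ids_from_roots_py (roots : List Int) : List Int :=
  (roots.foldl
    (fun (st : PySem.Dict Int Int × List Int × Int) r =>
      let unique := st.1
      let out := st.2.1
      let nxt := st.2.2
      let unique' := if unique.contains r then unique else unique.insert r nxt
      let nxt' := if unique.contains r then nxt else nxt + 1
      -- unique[r]: the key is always present here, so getD with default 0 is exact
      (unique', out ++ [unique'.getD r 0], nxt'))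
    (PySem.Dict.empty, ([] : List Int), (0 : Int))).2.1

-- ===== PORT B =====
-- Phase 1: seen = set(); for r: counts.append(len(seen)); seen.add(r).
-- Phase 2: [counts[roots.index(r)] for r in roots].
-- r is drawn from roots, so index? is some and the counts index is in range; getD 0 is exact.
def cluster_ids_from_roots_py_alt (roots : List Int) : List Int :=
  let st := roots.foldl
    (fun (st : PySem.Set Int × List Int) r =>
      (PySem.Set.add st.1 r, st.2 ++ [PySem.Set.len st.1]))
    (PySem.Set.empty, [])
  let counts := st.2
  roots.map (fun r =>
    (PySem.List.pyGet? counts (((PySem.List.index? roots r).getD 0 : Nat) : Int)).getD 0)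

-- ===== PRECONDITION & SPEC =====
def Spec_cluster_ids_from_roots_py (roots : List Int) (out : List Int) : Prop := out = cluster_ids_from_roots_py_alt roots
instance (roots : List Int) (out : List Int) : Decidable (Spec_cluster_ids_from_roots_py roots out) := by unfold Spec_cluster_ids_from_roots_py; infer_instance

-- ===== CLAIM (what is proved, stated in full; the proofs are below) =====
def Claim_equal_cluster_ids_from_roots_py : Prop := ∀ (roots : List Int), Dom_cluster_ids_from_roots_py roots → Spec_cluster_ids_from_roots_py roots (cluster_ids_from_roots_py roots)

-- ===== LEMMAS AND PROOFS =====

-- The id table for a list u of distinct roots: root ↦ its position in u.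
def pvTbl (u : List Int) : PySem.Dict Int Int :=
  PySem.Dict.mk ((PySem.List.enumerate u).map (fun p => (p.2, p.1)))

theorem pvTbl_keys (u : List Int) : (pvTbl u).keys = u := by
  show ((PySem.List.enumerate u).map (fun p => (p.2, p.1))).map (fun p => p.1) = u
  rw [List.map_map]
  exact PySem.List.map_snd_enumerate u 0

theorem pvTbl_contains (u : List Int) (r : Int) :
    (pvTbl u).contains r = decide (r ∈ u) := by
  rw [PySem.Dict.contains_eq_decide_mem_keys, pvTbl_keys]

theorem pvTbl_getD (u : List Int) (r : Int) (hu : u.Nodup) (h : r ∈ u) :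
    (pvTbl u).getD r 0 = (u.idxOf r : Int) := by
  have hk : (pvTbl u).keys.Nodup := by rw [pvTbl_keys]; exact hu
  have hm : (r, ((u.idxOf r : Nat) : Int)) ∈ (pvTbl u).items := by
    show _ ∈ (PySem.List.enumerate u).map (fun p => (p.2, p.1))
    refine List.mem_map.mpr ⟨(((u.idxOf r : Nat) : Int), r), ?_, rfl⟩
    refine (PySem.List.mem_enumerate_iff u 0 _).mpr
      ⟨u.idxOf r, List.idxOf_lt_length_of_mem h, ?_⟩
    simp [List.getElem_idxOf]
  exact PySem.Dict.getD_of_mem_items (pvTbl u) hm hk 0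

theorem pvTbl_insert (u : List Int) (r : Int) (h : r ∉ u) :
    (pvTbl u).insert r (u.length : Int) = pvTbl (u ++ [r]) := by
  have hc : (pvTbl u).contains r = false := by rw [pvTbl_contains]; simp [h]
  apply PySem.Dict.ext
  rw [PySem.Dict.items_insert_of_not_contains (pvTbl u) (u.length : Int) hc]
  simp [pvTbl, PySem.List.enumerate_append, PySem.List.enumerate_cons,
    PySem.List.enumerate_nil]

theorem pvIdx_update_of_mem (u rest : List Int) (r : Int) (h : r ∈ u) :
    (PySem.Set.update u rest).idxOf r = u.idxOf r := by
  rw [PySem.Set.update_eq_append_filter]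
  exact List.idxOf_append_of_mem h

theorem pvLoopA (rest u acc : List Int) (hu : u.Nodup) :
    rest.foldl
      (fun (st : PySem.Dict Int Int × List Int × Int) r =>
        let unique := st.1
        let out := st.2.1
        let nxt := st.2.2
        let unique' := if unique.contains r then unique else unique.insert r nxt
        let nxt' := if unique.contains r then nxt else nxt + 1
        (unique', out ++ [unique'.getD r 0], nxt'))
      (pvTbl u, acc, (u.length : Int))
    = (pvTbl (PySem.Set.update u rest),
       acc ++ rest.map (fun r => (((PySem.Set.update u rest).idxOf r : Nat) : Int)),
       ((PySem.Set.update u rest).length : Int)) := by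
  induction rest generalizing u acc with
  | nil => simp [PySem.Set.update_nil]
  | cons r rs ih =>
    rw [List.foldl_cons]
    by_cases hr : r ∈ u
    · have hc : (pvTbl u).contains r = true := by rw [pvTbl_contains]; simp [hr]
      simp only [hc, if_true]
      rw [ih u (acc ++ [(pvTbl u).getD r 0]) hu]
      rw [PySem.Set.update_cons, PySem.Set.add_of_mem hr]
      rw [pvTbl_getD u r hu hr]
      simp [pvIdx_update_of_mem u rs r hr, List.append_assoc]
    · have hc : (pvTbl u).contains r = false := by rw [pvTbl_contains]; simp [hr]
      simp only [hc, if_false, Bool.false_eq_true]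
      rw [pvTbl_insert u r hr]
      have hdisj : u.Disjoint [r] := by
        intro a ha hb
        rw [List.mem_singleton] at hb
        exact hr (hb ▸ ha)
      have hu' : (u ++ [r]).Nodup := hu.append (List.nodup_singleton r) hdisj
      have hlen : (u.length : Int) + 1 = ((u ++ [r]).length : Int) := by
        simp only [List.length_append, List.length_singleton]
        push_cast
        ring
      rw [hlen, ih (u ++ [r]) _ hu']
      rw [PySem.Set.update_cons, PySem.Set.add_of_not_mem hr]
      have hmem : r ∈ u ++ [r] := by simp
      have hidx : ((u ++ [r]).idxOf r) = u.length := by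
        rw [List.idxOf_append_of_notMem hr]; simp
      rw [pvTbl_getD (u ++ [r]) r hu' hmem]
      simp [pvIdx_update_of_mem (u ++ [r]) rs r hmem, hidx, List.append_assoc]

theorem pvA_eq (roots : List Int) :
    cluster_ids_from_roots_py roots
      = roots.map (fun r => (((PySem.List.dedup roots).idxOf r : Nat) : Int)) := by
  unfold cluster_ids_from_roots_py
  have h0 : (PySem.Dict.empty : PySem.Dict Int Int) = pvTbl [] := by
    apply PySem.Dict.ext
    simp [pvTbl, PySem.List.enumerate_nil, PySem.Dict.empty]
  rw [h0]
  have := pvLoopA roots [] [] List.nodup_nil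
  simp only [List.length_nil, Nat.cast_zero] at this
  rw [this]
  simp [PySem.Set.update_nil_left, PySem.List.dedup_eq_ofList]

-- Phase 1 of B computes the prefix distinct-counts.
theorem pvFoldCounts (l : List Int) : ∀ (s : PySem.Set Int) (acc : List Int),
    l.foldl (fun (st : PySem.Set Int × List Int) r =>
        (PySem.Set.add st.1 r, st.2 ++ [PySem.Set.len st.1])) (s, acc)
      = (PySem.Set.update s l,
         acc ++ (List.range l.length).map
           (fun i => ((PySem.Set.update s (l.take i)).length : Int))) := by
  induction l with
  | nil => intro s acc; simp [PySem.Set.update_nil]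
  | cons x xs ih =>
    intro s acc
    rw [List.foldl_cons, ih]
    simp [PySem.Set.update_cons, List.range_succ_eq_map, List.map_map,
      PySem.Set.update_nil, PySem.Set.len, Function.comp, List.append_assoc,
      Nat.succ_eq_add_one]

-- roots.index(r) for r ∈ roots is the first-occurrence index.
theorem pvIndexGetD (l : List Int) (r : Int) (h : r ∈ l) :
    (PySem.List.index? l r).getD 0 = l.idxOf r := by
  induction l with
  | nil => cases h
  | cons x xs ih =>
    by_cases hx : x = r
    · subst hx
      rw [PySem.List.index?_cons_self]
      simp [List.idxOf_cons_self]
    · have hr : r ∈ xs := by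
        rcases List.mem_cons.mp h with h' | h'
        · exact absurd h'.symm hx
        · exact h'
      rw [PySem.List.index?_cons_of_ne xs hx]
      rcases (PySem.List.index?_isSome_iff xs r).mpr hr |> Option.isSome_iff_exists.mp with ⟨k, hk⟩
      have := ih hr
      rw [hk] at this ⊢
      simp only [Option.map_some, Option.getD_some] at this ⊢
      rw [List.idxOf_cons_ne _ (fun h' => hx h'), this]

-- The key invariant: the number of distinct values (on top of accumulator u) in the
-- prefix before r's first occurrence equals r's position among the distinct values.
theorem pvCount (l : List Int) : ∀ (u : List Int) (r : Int), r ∉ u → r ∈ l →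
    (PySem.Set.update u (l.take (l.idxOf r))).length = (PySem.Set.update u l).idxOf r := by
  induction l with
  | nil => intro u r _ h; cases h
  | cons x xs ih =>
    intro u r hru h
    by_cases hx : x = r
    · subst hx
      rw [List.idxOf_cons_self]
      simp only [List.take_zero, PySem.Set.update_nil]
      rw [PySem.Set.update_cons, PySem.Set.add_of_not_mem hru]
      have hmem : x ∈ u ++ [x] := by simp
      rw [pvIdx_update_of_mem (u ++ [x]) xs x hmem]
      rw [List.idxOf_append_of_notMem hru]
      simp
    · have hr : r ∈ xs := by
        rcases List.mem_cons.mp h with h' | h'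
        · exact absurd h'.symm hx
        · exact h'
      rw [List.idxOf_cons_ne _ (fun h' => hx h'), List.take_succ_cons]
      rw [PySem.Set.update_cons, PySem.Set.update_cons]
      have hru' : r ∉ PySem.Set.add u x := by
        by_cases hxu : x ∈ u
        · rw [PySem.Set.add_of_mem hxu]; exact hru
        · rw [PySem.Set.add_of_not_mem hxu]
          intro hmem
          rcases List.mem_append.mp hmem with h' | h'
          · exact hru h'
          · exact hx (List.mem_singleton.mp h').symm
      exact ih (PySem.Set.add u x) r hru' hr

theorem pvB_eq (roots : List Int) :
    cluster_ids_from_roots_py_alt roots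
      = roots.map (fun r =>
          (((List.range roots.length).map
              (fun i => ((PySem.Set.update [] (roots.take i)).length : Int)))[
                ((PySem.List.index? roots r).getD 0)]?).getD 0) := by
  unfold cluster_ids_from_roots_py_alt
  rw [pvFoldCounts]
  simp [PySem.List.pyGet?_natCast]

-- ===== VERDICT (by name: the statement is the Claim_ definition above) =====
theorem cluster_ids_from_roots_py_spec : Claim_equal_cluster_ids_from_roots_py := by
  intro roots _
  unfold Spec_cluster_ids_from_roots_py
  rw [pvA_eq, pvB_eq]
  refine List.map_congr_left (fun r hr => ?_)
  rw [pvIndexGetD roots r hr]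
  have hlt : roots.idxOf r < roots.length := List.idxOf_lt_length_of_mem hr
  rw [List.getElem?_map, List.getElem?_range hlt]
  have := pvCount roots [] r (List.not_mem_nil) hr
  simp only [PySem.Set.update_nil_left] at this ⊢
  simp [this, PySem.List.dedup_eq_ofList]
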